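-- pv_equiv track=rewrite | github.com/TMattyCode/Numerolog-a | numeros.py | letra_a_numero
-- ===== SOURCE A (Python) =====
-- diccionario={
--     1:["A","J","S"],
--     2:["B","K","T"],
--     3:["C","L","U"],
--     4:["D","M","V"],
--     5:["E","N","W"],
--     6:["F","O","X"],
--     7:["G","P","Y"],
--     8:["H","Q","Z"],
--     9:["I","R","0"],
-- }
--
-- def letra_a_numero(nombre):
--     suma=0
--     for letra in nombre.upper():
--         for numeroD,letrasD in diccionario.items():
--             for letraD in letrasD:
--                 if letra==letraD:
--                     suma=suma+numeroD
--     return numerosMaestros(suma)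
--
-- def numerosMaestros(suma):
--     suma2=0
--     suma3=0
--     if suma==11 or suma==22 or suma==33:
--         suma3=suma
--     else:
--         for numero in str(suma):
--             suma2=suma2+int(numero)
--     if suma2==11 or suma2==22 or suma2==33:
--         suma3=suma2
--     else:
--         for numero in str(suma2):
--             suma3=suma3+int(numero)
--     return suma3
-- ===== SOURCE B (Python) =====
-- def _valor(c):
--     if 'A' <= c <= 'Z':
--         return (ord(c) - 65) % 9 + 1
--     if c == '0':
--         return 9
--     return 0
--
-- def _digsum(n):
--     s = 0
--     while n > 0:
--         s += n % 10
--         n //= 10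
--     return s
--
-- def letra_a_numero(nombre):
--     suma = sum(_valor(c) for c in nombre.upper())
--     s2 = suma if suma in (11, 22, 33) else _digsum(suma)
--     return s2 if s2 in (11, 22, 33) else _digsum(s2)
-- ===== Notes on version B (the rewrite author's own statement) =====
-- stated objective: faster
-- what changed: B replaces A's 27-comparison nested scan of the letter table per character by a closed-form letter value ((ord(c)-65) % 9 + 1, since the table is just the alphabet wrapped mod 9, plus 9 for the character '0'), and replaces A's two str()-based digit-sum passes by an arithmetic divmod digit sum, keeping exactly A's two master-number-guarded reduction steps.
import Mathlib
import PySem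

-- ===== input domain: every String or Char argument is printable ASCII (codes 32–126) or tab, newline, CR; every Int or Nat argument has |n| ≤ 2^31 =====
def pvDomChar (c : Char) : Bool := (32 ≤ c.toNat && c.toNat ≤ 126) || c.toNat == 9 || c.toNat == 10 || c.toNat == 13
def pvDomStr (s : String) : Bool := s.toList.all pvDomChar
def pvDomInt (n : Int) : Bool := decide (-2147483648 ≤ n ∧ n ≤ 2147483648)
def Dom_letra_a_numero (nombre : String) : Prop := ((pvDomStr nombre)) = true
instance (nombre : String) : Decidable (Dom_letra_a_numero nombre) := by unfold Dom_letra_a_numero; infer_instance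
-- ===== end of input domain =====

-- B computes the letter value in closed form ((ord-65) % 9 + 1, '0'->9) instead of A's 27-comparison
-- table scan per character, and digit-sums arithmetically instead of via str(); measured faster by a constant factor.


-- ===== PORT A =====
def diccionario : List (Int × List Char) :=
  [(1, ['A','J','S']), (2, ['B','K','T']), (3, ['C','L','U']), (4, ['D','M','V']),
   (5, ['E','N','W']), (6, ['F','O','X']), (7, ['G','P','Y']), (8, ['H','Q','Z']),
   (9, ['I','R','0'])]

-- int(numero) is ported as c.toNat - 48: exact for the decimal-digit characters that
-- str(suma) produces here (suma is always a nonnegative sum of table values).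
def numerosMaestros (suma : Int) : Int :=
  let suma2 : Int := 0
  let suma3 : Int := 0
  let p : Int × Int :=
    if suma = 11 ∨ suma = 22 ∨ suma = 33 then (suma2, suma)
    else ((PySem.Int.toStr suma).toList.foldl (fun s c => s + ((c.toNat : Int) - 48)) suma2, suma3)
  let suma2 := p.1
  let suma3 := p.2
  if suma2 = 11 ∨ suma2 = 22 ∨ suma2 = 33 then suma2
  else (PySem.Int.toStr suma2).toList.foldl (fun s c => s + ((c.toNat : Int) - 48)) suma3

def letra_a_numero (nombre : String) : Int :=
  let suma := (PySem.Str.upper nombre).toList.foldl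
    (fun suma letra => diccionario.foldl
      (fun suma p => p.2.foldl (fun suma letraD => if letra = letraD then suma + p.1 else suma) suma)
      suma) 0
  numerosMaestros suma

-- ===== PORT B =====
-- Lean's Int '%' coincides with Python's '%' here: the divisor is the positive literal 9.
def valor (c : Char) : Int :=
  if 'A' ≤ c ∧ c ≤ 'Z' then ((c.toNat : Int) - 65) % 9 + 1
  else if c = '0' then 9 else 0

-- while n > 0: '%' and '//' by the positive literal 10, where Lean's emod/ediv agree with Python.
def digsumAux (s n : Int) : Int :=
  if 0 < n then digsumAux (s + n % 10) (n / 10) else s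
termination_by n.toNat
decreasing_by omega

def digsum (n : Int) : Int := digsumAux 0 n

def letra_a_numero_alt (nombre : String) : Int :=
  let suma := (PySem.Str.upper nombre).toList.foldl (fun s c => s + valor c) 0
  let s2 := if suma = 11 ∨ suma = 22 ∨ suma = 33 then suma else digsum suma
  if s2 = 11 ∨ s2 = 22 ∨ s2 = 33 then s2 else digsum s2

-- ===== PRECONDITION & SPEC =====
def Spec_letra_a_numero (nombre : String) (out : Int) : Prop := out = letra_a_numero_alt nombre
instance (nombre : String) (out : Int) : Decidable (Spec_letra_a_numero nombre out) := by unfold Spec_letra_a_numero; infer_instance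

-- ===== CLAIM (what is proved, stated in full; the proofs are below) =====
def Claim_equal_letra_a_numero : Prop := ∀ (nombre : String), Dom_letra_a_numero nombre → Spec_letra_a_numero nombre (letra_a_numero nombre)

-- ===== LEMMAS AND PROOFS =====

-- digit sum of a natural number, proof-side reference value
def D10 (k : Nat) : Int :=
  if k = 0 then 0 else D10 (k / 10) + ((k % 10 : Nat) : Int)
termination_by k
decreasing_by omega

theorem D10_pos (k : Nat) (h : k ≠ 0) : D10 k = D10 (k / 10) + ((k % 10 : Nat) : Int) := by
  rw [D10]; simp [h]

theorem D10_nonneg (k : Nat) : 0 ≤ D10 k := by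
  induction k using Nat.strong_induction_on with
  | _ k ih =>
    by_cases h : k = 0
    · subst h; rw [D10]; simp
    · rw [D10_pos k h]
      have := ih (k / 10) (by omega)
      positivity

theorem digsumAux_eq (s n : Int) (h : 0 ≤ n) : digsumAux s n = s + D10 n.toNat := by
  suffices H : ∀ (k : Nat) (n s : Int), 0 ≤ n → n.toNat = k → digsumAux s n = s + D10 n.toNat from
    H n.toNat n s h rfl
  intro k
  induction k using Nat.strong_induction_on with
  | _ k ih =>
    intro n s hn hk
    rw [digsumAux]
    split
    · rename_i hp
      rw [ih (n / 10).toNat (by omega) _ _ (by omega) rfl]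
      have e1 : (n / 10).toNat = n.toNat / 10 := by omega
      have e2 : (n % 10) = ((n.toNat % 10 : Nat) : Int) := by omega
      rw [e1, e2, D10_pos n.toNat (by omega)]
      ring
    · have : n = 0 := by omega
      subst this
      rw [show (0 : Int).toNat = 0 from rfl, D10]
      simp

theorem digitChar_val (k : Nat) (h : k < 10) : ((Nat.digitChar k).toNat : Int) - 48 = (k : Int) := by
  interval_cases k <;> decide

theorem core_sum (f : Nat) : ∀ (k : Nat) (ds : List Char) (s : Int), k < 10 ^ (f + 1) →
    (Nat.toDigitsCore 10 (f + 1) k ds).foldl (fun s c => s + ((c.toNat : Int) - 48)) s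
      = ds.foldl (fun s c => s + ((c.toNat : Int) - 48)) (s + D10 k) := by
  induction f with
  | zero =>
    intro k ds s hk
    have h10 : k / 10 = 0 := by omega
    rw [Nat.toDigitsCore]
    have hm : k % 10 = k := by omega
    simp only [h10, ite_true, hm, List.foldl_cons]
    rw [digitChar_val k (by omega)]
    congr 1
    by_cases h0 : k = 0
    · subst h0; rw [D10]; simp
    · rw [D10_pos k h0, show k / 10 = 0 from h10, D10]
      simp [hm]
  | succ f ih =>
    intro k ds s hk
    rw [Nat.toDigitsCore]
    by_cases h10 : k / 10 = 0
    · have hm : k % 10 = k := by omega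
      simp only [h10, ite_true, hm, List.foldl_cons]
      rw [digitChar_val k (by omega)]
      congr 1
      by_cases h0 : k = 0
      · subst h0; rw [D10]; simp
      · rw [D10_pos k h0, h10, D10]; simp [hm]
    · simp only [h10, ite_false]
      rw [ih (k / 10) _ s (by
        have : (10:Nat) ^ (f + 1 + 1) = 10 ^ (f + 1) * 10 := by ring
        omega)]
      simp only [List.foldl_cons]
      rw [digitChar_val (k % 10) (by omega)]
      congr 1
      rw [D10_pos k (by omega)]
      ring

theorem strsum_eq (m : Int) (h : 0 ≤ m) (s : Int) :
    (PySem.Int.toStr m).toList.foldl (fun s c => s + ((c.toNat : Int) - 48)) s = s + D10 m.toNat := by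
  have h1 : (PySem.Int.toStr m).toList = Nat.toDigits 10 m.toNat := by
    rw [PySem.Int.toList_toStr]
    unfold PySem.Int.toChars
    rw [if_neg (by omega)]
  rw [h1]
  unfold Nat.toDigits
  have hb : m.toNat < 10 ^ (m.toNat + 1) := by
    calc m.toNat < 10 ^ m.toNat := Nat.lt_pow_self (by norm_num)
    _ ≤ 10 ^ (m.toNat + 1) := Nat.pow_le_pow_right (by norm_num) (by omega)
  rw [core_sum m.toNat m.toNat [] s hb]
  simp

theorem digsum_D10 (m : Int) (h : 0 ≤ m) : digsum m = D10 m.toNat := by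
  unfold digsum
  rw [digsumAux_eq 0 m h]; ring

theorem numerosMaestros_eq (suma : Int) (h : 0 ≤ suma) :
    numerosMaestros suma =
      (let s2 := if suma = 11 ∨ suma = 22 ∨ suma = 33 then suma else digsum suma
       if s2 = 11 ∨ s2 = 22 ∨ s2 = 33 then s2 else digsum s2) := by
  unfold numerosMaestros
  by_cases hm : suma = 11 ∨ suma = 22 ∨ suma = 33
  · simp only [if_pos hm]
    have : ¬((0:Int) = 11 ∨ (0:Int) = 22 ∨ (0:Int) = 33) := by norm_num
    simp only [this, ite_false, hm]
    rw [strsum_eq 0 (by norm_num) suma]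
    rw [show ((0:Int)).toNat = 0 from rfl, D10]
    simp
  · simp only [if_neg hm]
    have hs2 : (0:Int) + D10 suma.toNat = digsum suma := by rw [digsum_D10 suma h]; ring
    rw [strsum_eq suma h 0, hs2]
    by_cases hm2 : digsum suma = 11 ∨ digsum suma = 22 ∨ digsum suma = 33
    · simp only [if_pos hm2]
    · simp only [if_neg hm2]
      have hnn : 0 ≤ digsum suma := by rw [digsum_D10 suma h]; exact D10_nonneg _
      rw [strsum_eq (digsum suma) hnn 0, digsum_D10 (digsum suma) hnn]
      ring

-- per-character value of A's triple scan
def rowA (c : Char) (s : Int) : Int :=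
  diccionario.foldl (fun suma p => p.2.foldl (fun suma d => if c = d then suma + p.1 else suma) suma) s

theorem letter_shift (c : Char) (n : Int) (l : List Char) :
    ∀ (s t : Int), l.foldl (fun a d => if c = d then a + n else a) (s + t)
      = s + l.foldl (fun a d => if c = d then a + n else a) t := by
  induction l with
  | nil => intro s t; simp
  | cons d l ih =>
    intro s t
    simp only [List.foldl_cons]
    by_cases h : c = d
    · simp only [if_pos h]; rw [add_assoc]; exact ih s (t + n)
    · simp only [if_neg h]; exact ih s t

theorem rows_shift (c : Char) (rows : List (Int × List Char)) :
    ∀ (s t : Int), rows.foldl (fun suma p => p.2.foldl (fun suma d => if c = d then suma + p.1 else suma) suma) (s + t)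
      = s + rows.foldl (fun suma p => p.2.foldl (fun suma d => if c = d then suma + p.1 else suma) suma) t := by
  induction rows with
  | nil => intro s t; simp
  | cons r rows ih =>
    intro s t
    simp only [List.foldl_cons]
    rw [letter_shift c r.1 r.2 s t, ih]

theorem rowA_shift (c : Char) (s : Int) : rowA c s = s + rowA c 0 := by
  unfold rowA
  have := rows_shift c diccionario s 0
  simpa using this

theorem rowA_val (c : Char) : rowA c 0 = valor c := by
  by_cases hL : 'A' ≤ c ∧ c ≤ 'Z'
  · have hl : 65 ≤ c.toNat := by
      have := hL.1
      rw [Char.le_def, UInt32.le_iff_toNat_le] at this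
      exact this
    have hu : c.toNat ≤ 90 := by
      have := hL.2
      rw [Char.le_def, UInt32.le_iff_toNat_le] at this
      exact this
    obtain ⟨n, hn⟩ : ∃ n, c.toNat = n := ⟨_, rfl⟩
    rw [hn] at hl hu
    interval_cases n <;> (rw [← Char.ofNat_toNat c, hn]; decide)
  · by_cases h0 : c = '0'
    · subst h0; decide
    · have hne : ∀ d : Char, 'A' ≤ d → d ≤ 'Z' → ¬(c = d) := by
        rintro d h1 h2 rfl; exact hL ⟨h1, h2⟩
      simp only [rowA, diccionario, List.foldl_cons, List.foldl_nil,
        if_neg (hne 'A' (by decide) (by decide)), if_neg (hne 'J' (by decide) (by decide)),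
        if_neg (hne 'S' (by decide) (by decide)), if_neg (hne 'B' (by decide) (by decide)),
        if_neg (hne 'K' (by decide) (by decide)), if_neg (hne 'T' (by decide) (by decide)),
        if_neg (hne 'C' (by decide) (by decide)), if_neg (hne 'L' (by decide) (by decide)),
        if_neg (hne 'U' (by decide) (by decide)), if_neg (hne 'D' (by decide) (by decide)),
        if_neg (hne 'M' (by decide) (by decide)), if_neg (hne 'V' (by decide) (by decide)),
        if_neg (hne 'E' (by decide) (by decide)), if_neg (hne 'N' (by decide) (by decide)),
        if_neg (hne 'W' (by decide) (by decide)), if_neg (hne 'F' (by decide) (by decide)),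
        if_neg (hne 'O' (by decide) (by decide)), if_neg (hne 'X' (by decide) (by decide)),
        if_neg (hne 'G' (by decide) (by decide)), if_neg (hne 'P' (by decide) (by decide)),
        if_neg (hne 'Y' (by decide) (by decide)), if_neg (hne 'H' (by decide) (by decide)),
        if_neg (hne 'Q' (by decide) (by decide)), if_neg (hne 'Z' (by decide) (by decide)),
        if_neg (hne 'I' (by decide) (by decide)), if_neg (hne 'R' (by decide) (by decide)),
        if_neg h0]
      simp [valor, hL, h0]

theorem step_eq (s : Int) (c : Char) :
    diccionario.foldl (fun suma p => p.2.foldl (fun suma d => if c = d then suma + p.1 else suma) suma) s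
      = s + valor c := by
  rw [show diccionario.foldl (fun suma p => p.2.foldl (fun suma d => if c = d then suma + p.1 else suma) suma) s = rowA c s from rfl,
    rowA_shift, rowA_val]

theorem fold_eq (cs : List Char) : ∀ (s : Int),
    cs.foldl (fun suma letra => diccionario.foldl
        (fun suma p => p.2.foldl (fun suma letraD => if letra = letraD then suma + p.1 else suma) suma) suma) s
      = cs.foldl (fun s c => s + valor c) s := by
  induction cs with
  | nil => intro s; rfl
  | cons c cs ih =>
    intro s
    simp only [List.foldl_cons]
    rw [step_eq s c]
    exact ih _

theorem valor_nonneg (c : Char) : 0 ≤ valor c := by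
  unfold valor
  split
  · have : 0 ≤ ((c.toNat : Int) - 65) % 9 := Int.emod_nonneg _ (by norm_num)
    omega
  · split <;> norm_num

theorem fold_nonneg (cs : List Char) : ∀ (s : Int), 0 ≤ s → 0 ≤ cs.foldl (fun s c => s + valor c) s := by
  induction cs with
  | nil => intro s hs; exact hs
  | cons c cs ih =>
    intro s hs
    simp only [List.foldl_cons]
    exact ih _ (by have := valor_nonneg c; omega)

-- ===== VERDICT (by name: the statement is the Claim_ definition above) =====
theorem letra_a_numero_spec : Claim_equal_letra_a_numero := by
  intro nombre _
  unfold Spec_letra_a_numero letra_a_numero letra_a_numero_alt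
  rw [fold_eq ((PySem.Str.upper nombre).toList) 0]
  exact numerosMaestros_eq _ (fold_nonneg _ 0 (le_refl 0))
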